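-- pv_equiv track=rewrite | github.com/Damlabuji/DataComOdev | protocol_utils.py | calculate_2d_parity
-- ===== SOURCE A (Python) =====
-- def calculate_2d_parity(text):
--     # Metni matrise (örneğin 8 genişliğinde bloklara) böler [cite: 18]
--     # Basitlik için her karakteri 8 bitlik bir satır gibi düşünüp
--     # satır ve sütun parity'lerini hesaplayalım.
--     binary_rows = [format(ord(c), '08b') for c in text]
--
--     row_parities = []
--     for row in binary_rows:
--         row_parities.append('1' if row.count('1') % 2 != 0 else '0')  # Row Parity (Even)
--
--     col_parities = []
--     for col_idx in range(8):
--         col_bits = [row[col_idx] for row in binary_rows]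
--         col_parities.append('1' if col_bits.count('1') % 2 != 0 else '0')  # Col Parity
--
--     # Sonuç: RowParities + Separator + ColParities
--     return "".join(row_parities) + "-" + "".join(col_parities)
-- ===== SOURCE B (Python) =====
-- def calculate_2d_parity(text):
--     # Single pass: emit each char's row parity and toggle 8 running column parities.
--     row_out = []
--     cols = [False] * 8
--     for c in text:
--         s = format(ord(c), '08b')
--         row_out.append('1' if s.count('1') % 2 != 0 else '0')
--         for i in range(8):
--             cols[i] = cols[i] != (s[i] == '1')
--     return "".join(row_out) + "-" + "".join('1' if b else '0' for b in cols)
-- ===== Notes on version B (the rewrite author's own statement) =====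
-- stated objective: alternative
-- what changed: Replaces the three-phase version (build all 8-bit rows, map row parities, then 8 column re-scans over the stored rows) with one pass that keeps no row list: per character it emits the row parity and toggles eight running column-parity accumulators.
import Mathlib
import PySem

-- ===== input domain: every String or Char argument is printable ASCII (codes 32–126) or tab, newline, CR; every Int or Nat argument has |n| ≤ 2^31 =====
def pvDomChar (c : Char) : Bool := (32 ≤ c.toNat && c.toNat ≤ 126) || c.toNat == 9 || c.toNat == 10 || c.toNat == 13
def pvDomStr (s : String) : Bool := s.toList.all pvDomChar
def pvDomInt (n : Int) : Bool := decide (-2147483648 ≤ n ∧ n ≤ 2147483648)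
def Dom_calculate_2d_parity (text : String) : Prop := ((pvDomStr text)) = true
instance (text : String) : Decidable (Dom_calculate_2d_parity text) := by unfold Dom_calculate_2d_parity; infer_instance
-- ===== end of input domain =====

-- B replaces A's three phases (store all 8-bit rows, map row parities, 8 column re-scans)
-- by one pass that emits each row parity and toggles 8 running column accumulators (objective: alternative).

-- shared helper: Python's format(n, '08b') (both A and B call it per character)
def pvBinDigits : Nat → List Char
  | 0 => []
  | n + 1 => pvBinDigits ((n + 1) / 2) ++ [if (n + 1) % 2 == 1 then '1' else '0']
decreasing_by exact Nat.div_lt_self (Nat.succ_pos n) (by omega)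

def pvFormat08b (n : Nat) : List Char :=
  let d := if n = 0 then ['0'] else pvBinDigits n
  List.replicate (8 - d.length) '0' ++ d

-- ===== PORT A =====
def calculate_2d_parity (text : String) : String :=
  let binary_rows := text.toList.map (fun c => pvFormat08b c.toNat)
  let row_parities := binary_rows.map (fun row =>
    if PySem.List.count row '1' % 2 ≠ 0 then '1' else '0')
  let col_parities := (List.range 8).map (fun col_idx =>
    -- row[col_idx]: in range, since format(·,'08b') always has length ≥ 8
    let col_bits := binary_rows.map (fun row => row.getD col_idx '0')
    if PySem.List.count col_bits '1' % 2 ≠ 0 then '1' else '0')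
  String.mk (row_parities ++ ['-'] ++ col_parities)

-- ===== PORT B =====
def calculate_2d_parity_alt (text : String) : String :=
  let r := text.toList.foldl (fun acc c =>
    let s := pvFormat08b c.toNat
    (acc.1 ++ [if PySem.List.count s '1' % 2 ≠ 0 then '1' else '0'],
     (List.range 8).map (fun i => acc.2.getD i false != (s.getD i '0' == '1'))))
    ([], List.replicate 8 false)
  String.mk (r.1 ++ ['-'] ++ r.2.map (fun b => if b then '1' else '0'))

-- ===== PRECONDITION & SPEC =====
def Spec_calculate_2d_parity (text : String) (out : String) : Prop := out = calculate_2d_parity_alt text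
instance (text : String) (out : String) : Decidable (Spec_calculate_2d_parity text out) := by unfold Spec_calculate_2d_parity; infer_instance

-- ===== CLAIM (what is proved, stated in full; the proofs are below) =====
def Claim_equal_calculate_2d_parity : Prop := ∀ (text : String), Dom_calculate_2d_parity text → Spec_calculate_2d_parity text (calculate_2d_parity text)

-- ===== LEMMAS AND PROOFS =====

-- the per-character row-parity character
def pvRowChar (c : Char) : Char :=
  if PySem.List.count (pvFormat08b c.toNat) '1' % 2 ≠ 0 then '1' else '0'

-- column-i parity of a character list, as a Bool
def pvColPar (cs : List Char) (i : Nat) : Bool :=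
  decide (PySem.List.count (cs.map (fun c => (pvFormat08b c.toNat).getD i '0')) '1' % 2 ≠ 0)

lemma pvParityFlip (n : Nat) (b : Bool) :
    decide ((n + (if b then 1 else 0)) % 2 ≠ 0) = (b != decide (n % 2 ≠ 0)) := by
  cases b <;> rcases Nat.mod_two_eq_zero_or_one n with h | h <;> simp [Nat.add_mod, h]

lemma pvColPar_cons (c : Char) (cs : List Char) (i : Nat) :
    pvColPar (c :: cs) i = (((pvFormat08b c.toNat).getD i '0' == '1') != pvColPar cs i) := by
  simp only [pvColPar, List.map_cons, PySem.List.count, List.count_cons]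
  exact pvParityFlip _ _

lemma pvEight_ext (cols : List Bool) (h : cols.length = 8) :
    cols = (List.range 8).map (fun i => cols.getD i false) := by
  apply List.ext_getElem
  · simp [h]
  · intro j h1 h2
    simp [List.getD_eq_getElem?_getD, List.getElem?_eq_getElem h1]

-- loop invariant of B's single pass
lemma pvFold_inv (cs : List Char) (rps : List Char) (cols : List Bool) (h : cols.length = 8) :
    cs.foldl (fun acc c =>
      let s := pvFormat08b c.toNat
      (acc.1 ++ [if PySem.List.count s '1' % 2 ≠ 0 then '1' else '0'],
       (List.range 8).map (fun i => acc.2.getD i false != (s.getD i '0' == '1'))))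
      (rps, cols)
    = (rps ++ cs.map pvRowChar,
       (List.range 8).map (fun i => cols.getD i false != pvColPar cs i)) := by
  induction cs generalizing rps cols with
  | nil =>
    refine congrArg₂ Prod.mk (by simp) ?_
    calc cols = (List.range 8).map (fun i => cols.getD i false) := pvEight_ext cols h
      _ = (List.range 8).map (fun i => cols.getD i false != pvColPar [] i) := by
            simp [pvColPar, PySem.List.count]
  | cons c cs ih =>
    simp only [List.foldl_cons]
    rw [ih _ _ (by simp)]
    refine congrArg₂ Prod.mk ?_ ?_
    · simp [pvRowChar]
    · refine List.map_congr_left (fun i hi => ?_)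
      rw [List.mem_range] at hi
      rw [PySem.List.getD_map_range _ _ _ _ hi, pvColPar_cons]
      cases cols.getD i false <;>
        cases ((pvFormat08b c.toNat).getD i '0' == '1') <;>
        cases pvColPar cs i <;> rfl

-- ===== VERDICT (by name: the statement is the Claim_ definition above) =====
theorem calculate_2d_parity_spec : Claim_equal_calculate_2d_parity := by
  intro text _
  show calculate_2d_parity text = calculate_2d_parity_alt text
  unfold calculate_2d_parity calculate_2d_parity_alt
  rw [pvFold_inv _ _ _ (by simp)]
  simp only [List.map_map, List.nil_append]
  congr 1
  refine congrArg₂ (· ++ ·) (congrArg₂ (· ++ ·) ?_ rfl) ?_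
  · exact List.map_congr_left fun c _ => rfl
  · refine List.map_congr_left (fun i hi => ?_)
    rw [List.mem_range] at hi
    simp only [Function.comp_apply]
    rw [List.getD_replicate _ hi]
    simp [pvColPar, Function.comp_def]
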